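-- pv_equiv track=rewrite | github.com/aaalexm/biotools | dna_to_protein.py | dna_to_codons
-- ===== SOURCE A (Python) =====
-- def dna_to_codons(fasta):
--     codon = []
--     codon_list = []
--     for i in fasta:
--         codon.append(i)
--         if len(codon) == 3:
--             codon = "".join(codon)
--             codon_list.append(codon)
--             codon = []
--     return codon_list
-- ===== SOURCE B (Python) =====
-- def dna_to_codons(fasta):
--     codons = []
--     i = 0
--     while i + 3 <= len(fasta):
--         codons.append(fasta[i:i + 3])
--         i += 3
--     return codons
-- ===== Notes on version B (the rewrite author's own statement) =====
-- stated objective: idiomatic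
-- what changed: Replaces the character-by-character scan with a mutable 3-slot buffer by a while loop that strides over start indices in steps of 3 and slices each complete codon directly, dropping any trailing fragment.
import Mathlib
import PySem

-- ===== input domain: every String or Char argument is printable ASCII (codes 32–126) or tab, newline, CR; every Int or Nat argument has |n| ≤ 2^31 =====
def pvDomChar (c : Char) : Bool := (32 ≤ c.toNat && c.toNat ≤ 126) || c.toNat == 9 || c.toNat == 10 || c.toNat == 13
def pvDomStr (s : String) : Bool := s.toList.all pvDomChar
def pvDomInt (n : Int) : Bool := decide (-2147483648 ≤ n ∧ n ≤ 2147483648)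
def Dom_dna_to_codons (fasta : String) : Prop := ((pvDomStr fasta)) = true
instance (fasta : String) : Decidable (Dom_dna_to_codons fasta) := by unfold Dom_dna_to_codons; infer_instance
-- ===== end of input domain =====

-- B replaces A's char-by-char scan with a mutable 3-slot buffer by a while loop that
-- strides over start indices in steps of 3, slicing each complete codon (objective: idiomatic).

-- ===== PORT A =====
-- one iteration of A's for-loop: state = (codon_list, codon buffer)
def pvStepA (st : List String × List Char) (c : Char) : List String × List Char :=
  let codon := st.2 ++ [c]
  if codon.length = 3 then (st.1 ++ [String.ofList codon], []) else (st.1, codon)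

def dna_to_codons (fasta : String) : List String :=
  (fasta.toList.foldl pvStepA ([], [])).1

-- ===== PORT B =====
-- B's while loop: while i + 3 <= len(fasta): codons.append(fasta[i:i+3]); i += 3
def pvLoopB (cs : List Char) (i : Nat) (acc : List String) : List String :=
  if i + 3 ≤ cs.length then
    pvLoopB cs (i + 3) (acc ++ [String.ofList (PySem.List.slice cs (some (i : Int)) (some ((i : Int) + 3)))])
  else acc
termination_by cs.length - i

def dna_to_codons_alt (fasta : String) : List String :=
  pvLoopB fasta.toList 0 []

-- ===== PRECONDITION & SPEC =====
def Spec_dna_to_codons (fasta : String) (out : List String) : Prop := out = dna_to_codons_alt fasta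
instance (fasta : String) (out : List String) : Decidable (Spec_dna_to_codons fasta out) := by unfold Spec_dna_to_codons; infer_instance

-- ===== CLAIM (what is proved, stated in full; the proofs are below) =====
def Claim_equal_dna_to_codons : Prop := ∀ (fasta : String), Dom_dna_to_codons fasta → Spec_dna_to_codons fasta (dna_to_codons fasta)

-- ===== LEMMAS AND PROOFS =====
-- common characterisation: the list of complete 3-chunks
def pvChunk3 : List Char → List String
  | a :: b :: c :: rest => String.ofList [a, b, c] :: pvChunk3 rest
  | _ => []

theorem chunk3_of_short (l : List Char) (h : l.length < 3) : pvChunk3 l = [] := by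
  match l with
  | [] => rfl
  | [_] => rfl
  | [_, _] => rfl
  | _ :: _ :: _ :: _ => exact absurd h (by simp)

theorem foldA_chunk (cs : List Char) : ∀ (acc : List String),
    (cs.foldl pvStepA (acc, [])).1 = acc ++ pvChunk3 cs := by
  induction cs using pvChunk3.induct with
  | case1 a b c rest ih =>
    intro acc
    simp only [List.foldl, pvStepA, pvChunk3]
    norm_num
    rw [ih]
    simp
  | case2 cs h =>
    intro acc
    match cs with
    | [] => simp [pvChunk3]
    | [a] => simp [pvChunk3, pvStepA, List.foldl]
    | [a, b] => simp [pvChunk3, pvStepA, List.foldl]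
    | a :: b :: c :: rest => exact absurd rfl (h a b c rest)

theorem loopB_chunk (cs : List Char) (i : Nat) (acc : List String) :
    pvLoopB cs i acc = acc ++ pvChunk3 (cs.drop i) := by
  induction i, acc using pvLoopB.induct (cs := cs) with
  | case1 i acc hle ih =>
    rw [pvLoopB, if_pos hle, ih]
    have hslice : PySem.List.slice cs (some (i : Int)) (some ((i : Int) + 3))
        = (cs.drop i).take 3 := by
      have := PySem.List.slice_natCast_add cs i 3
      simpa using this
    have hlen : 3 ≤ (cs.drop i).length := by simp; omega
    obtain ⟨a, b, c, rest, hd⟩ : ∃ a b c rest, cs.drop i = a :: b :: c :: rest := by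
      match h : cs.drop i with
      | [] => rw [h] at hlen; simp at hlen
      | [x] => rw [h] at hlen; simp at hlen
      | [x, y] => rw [h] at hlen; simp at hlen
      | x :: y :: z :: r => exact ⟨x, y, z, r, rfl⟩
    have hdrop : cs.drop (i + 3) = rest := by
      have : cs.drop (i + 3) = (cs.drop i).drop 3 := by
        rw [List.drop_drop]
      rw [this, hd]; rfl
    rw [hslice, hd, hdrop]
    simp [pvChunk3]
  | case2 i acc hgt =>
    rw [pvLoopB, if_neg hgt, chunk3_of_short]
    · simp
    · simp; omega

-- ===== VERDICT (by name: the statement is the Claim_ definition above) =====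
theorem dna_to_codons_spec : Claim_equal_dna_to_codons := by
  intro fasta _
  unfold Spec_dna_to_codons dna_to_codons dna_to_codons_alt
  rw [loopB_chunk]
  simpa using foldA_chunk fasta.toList []
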